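-- pv_equiv track=rewrite | github.com/CaizhiXu/LeetCode---Python-Solutions | 1258. Synonymous Sentences _ graph.py | bfs
-- ===== SOURCE A (Python) =====
-- from collections import defaultdict, deque
--
-- def bfs(v, graph):  ## time - O(V+E), space - O(V)
--     res, visited = [], set()
--     dq = deque()
--     dq.append(v)
--     visited.add(v)
--     while dq:
--         node = dq.popleft()
--         res.append(node)
--         for nei in graph[node]:
--             if nei not in visited:
--                 visited.add(nei)
--                 dq.append(nei)
--     return sorted(res)
-- ===== SOURCE B (Python) =====
-- def bfs(v, graph):
--     res, visited = [], set()
--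
--     def dfs(node):
--         visited.add(node)
--         res.append(node)
--         for nei in graph[node]:
--             if nei not in visited:
--                 dfs(nei)
--
--     dfs(v)
--     return sorted(res)
-- ===== Notes on version B (the rewrite author's own statement) =====
-- stated objective: alternative
-- what changed: Replaces the iterative deque-based BFS frontier loop with a recursive depth-first search helper that collects the same connected component before sorting.
import Mathlib
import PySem

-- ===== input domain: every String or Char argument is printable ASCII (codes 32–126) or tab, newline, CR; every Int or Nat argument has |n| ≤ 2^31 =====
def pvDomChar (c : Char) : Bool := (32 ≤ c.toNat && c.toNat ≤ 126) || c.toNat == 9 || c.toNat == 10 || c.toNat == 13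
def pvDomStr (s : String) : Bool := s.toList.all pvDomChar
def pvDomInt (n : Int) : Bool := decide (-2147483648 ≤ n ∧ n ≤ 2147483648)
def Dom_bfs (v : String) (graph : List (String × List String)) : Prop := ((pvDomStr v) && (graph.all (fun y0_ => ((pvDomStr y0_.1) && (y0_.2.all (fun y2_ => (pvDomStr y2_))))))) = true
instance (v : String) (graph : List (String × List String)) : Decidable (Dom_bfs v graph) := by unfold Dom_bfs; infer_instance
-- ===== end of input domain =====

-- B replaces A's iterative deque-based BFS frontier loop by a recursive depth-first
-- search collecting the same connected component before sorting (objective: alternative).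

-- ===== PORT A =====
-- graph[node]: dict lookup; inside Pre_ the key is always present, so the default [] is never used
def pvNbrs (graph : List (String × List String)) (node : String) : List String :=
  (PySem.Dict.mk graph).getD node []

-- the body of A's for-loop: 'if nei not in visited: visited.add(nei); dq.append(nei)'
def pvStep : List String × List String → String → List String × List String :=
  fun st nei => if st.1.contains nei then st else (st.1 ++ [nei], st.2 ++ [nei])

-- fuel bound: the while loop runs once per enqueued node, and at most
-- 1 + (total number of listed neighbours) nodes are ever enqueued; fuel only makes the recursion total
def pvFuel (graph : List (String × List String)) : Nat :=
  1 + (graph.flatMap (fun p => p.2)).length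

-- A's while loop; state = (queue dq, set visited, list res)
def bfsLoopA (graph : List (String × List String)) :
    Nat → List String → List String → List String → List String
  | _, [], _, res => res
  | 0, _ :: _, _, res => res
  | Nat.succ fuel, node :: dq, visited, res =>
      let st := (pvNbrs graph node).foldl pvStep (visited, dq)
      bfsLoopA graph fuel st.2 st.1 (res ++ [node])

def bfs (v : String) (graph : List (String × List String)) : List String :=
  PySem.List.sorted (bfsLoopA graph (pvFuel graph) [v] [v] []) (fun x => x) false

-- ===== PORT B =====
-- dfs(node): visited.add(node); res.append(node); recurse on each not-yet-visited neighbour.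
-- state = (visited set, res list); fuel bounds the recursion depth and only makes it total
def dfsB (graph : List (String × List String)) :
    Nat → String → List String × List String → List String × List String
  | 0, _, st => st
  | Nat.succ fuel, node, st =>
      (pvNbrs graph node).foldl
        (fun st nei => if st.1.contains nei then st else dfsB graph fuel nei st)
        (st.1 ++ [node], st.2 ++ [node])

def bfs_alt (v : String) (graph : List (String × List String)) : List String :=
  PySem.List.sorted (dfsB graph (pvFuel graph) v ([], [])).2 (fun x => x) false

-- ===== PRECONDITION & SPEC =====
-- neighbour lookup for the precondition, written independently of the ports:
-- Python dict semantics, the LAST pair with the key wins; missing key gives []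
def pvAdj (graph : List (String × List String)) (u : String) : List String :=
  ((graph.reverse.find? (fun p => p.1 == u)).map (fun p => p.2)).getD []

-- one saturation step of the reachable set: append every listed neighbour of a
-- current member that is not yet present
def pvClose (graph : List (String × List String)) (S : List String) : List String :=
  S.foldl (fun acc u => (pvAdj graph u).foldl
    (fun acc w => if acc.contains w then acc else acc ++ [w]) acc) S

-- the set of nodes reachable from v (saturation reaches its fixpoint well within
-- 1 + number of listed neighbours steps)
def pvReachSet (v : String) (graph : List (String × List String)) : List String :=
  Nat.iterate (pvClose graph) (1 + (graph.flatMap (fun p => p.2)).length) [v]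

-- Pre_ excludes exactly the inputs on which the Python A raises KeyError: those where v,
-- or some node reachable from v through the adjacency lists, is not a key of graph.
def Pre_bfs (v : String) (graph : List (String × List String)) : Prop :=
  ∀ u ∈ pvReachSet v graph, u ∈ graph.map (fun p => p.1)
instance (v : String) (graph : List (String × List String)) : Decidable (Pre_bfs v graph) := by
  unfold Pre_bfs; infer_instance
def pvWitness_bfs : String × (List (String × List String)) :=
  ("a", [("a", ["b"]), ("b", ["a", "b"])])
def Spec_bfs (v : String) (graph : List (String × List String)) (out : List String) : Prop := out = bfs_alt v graph
instance (v : String) (graph : List (String × List String)) (out : List String) : Decidable (Spec_bfs v graph out) := by unfold Spec_bfs; infer_instance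

-- ===== CLAIM (what is proved, stated in full; the proofs are below) =====
def Claim_equal_bfs : Prop := ∀ (v : String) (graph : List (String × List String)), Dom_bfs v graph → Pre_bfs v graph → Spec_bfs v graph (bfs v graph)

-- ===== LEMMAS AND PROOFS =====

-- reachability from v along listed neighbours: the connected component both programs collect
inductive pvReach (graph : List (String × List String)) (v : String) : String → Prop
  | refl : pvReach graph v v
  | step {u w : String} : pvReach graph v u → w ∈ pvNbrs graph u → pvReach graph v w

-- every node either program ever visits lies in this list
def pvU (v : String) (graph : List (String × List String)) : List String :=
  v :: graph.flatMap (fun p => p.2)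

lemma nbrs_subset (graph : List (String × List String)) (node x : String)
    (hx : x ∈ pvNbrs graph node) : x ∈ graph.flatMap (fun p => p.2) := by
  induction graph with
  | nil => simp [pvNbrs, PySem.Dict.getD, PySem.Dict.get?] at hx
  | cons p t ih =>
      rw [pvNbrs, PySem.Dict.getD_eq_get?_getD] at hx
      rcases p with ⟨k, vs⟩
      rw [PySem.Dict.get?_mk_cons] at hx
      simp only [List.flatMap_cons, List.mem_append]
      by_cases hk : (k == node) = true
      · simp [hk] at hx; exact Or.inl hx
      · simp [hk] at hx
        right
        exact ih (by rw [pvNbrs, PySem.Dict.getD_eq_get?_getD]; exact hx)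

lemma filter_mono_len (l : List String) (p q : String → Bool) (h : ∀ x, q x = true → p x = true) :
    (l.filter q).length ≤ (l.filter p).length := by
  have : l.filter q = (l.filter p).filter q := by
    rw [List.filter_filter]
    apply List.filter_congr
    intro x _
    by_cases hq : q x = true
    · simp [hq, h x hq]
    · simp [Bool.eq_false_iff.mpr hq]
  rw [this]; exact List.length_filter_le _ _

lemma filter_drop (d : List String) : ∀ l : List String, d.Nodup → (∀ x ∈ d, x ∈ l) →
    (l.filter (fun x => ¬ x ∈ d)).length + d.length ≤ l.length := by
  induction d with
  | nil => intro l _ _; simp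
  | cons a d ih =>
      intro l hnd hsub
      have ha : a ∈ l := hsub a (List.mem_cons_self ..)
      have hstep : l.filter (fun x => ¬ x ∈ (a :: d)) = (l.filter (fun x => x ≠ a)).filter (fun x => ¬ x ∈ d) := by
        rw [List.filter_filter]
        apply List.filter_congr
        intro x _
        by_cases h1 : x = a <;> by_cases h2 : x ∈ d <;> simp [h1, h2]
      have hlt : (l.filter (fun x => x ≠ a)).length < l.length := by
        apply List.length_filter_lt_length_iff_exists.mpr
        exact ⟨a, ha, by simp⟩
      have hsub' : ∀ x ∈ d, x ∈ l.filter (fun x => x ≠ a) := by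
        intro x hx
        refine List.mem_filter.mpr ⟨hsub x (List.mem_cons_of_mem _ hx), ?_⟩
        have : x ≠ a := fun he => (List.nodup_cons.mp hnd).1 (he ▸ hx)
        simp [this]
      have := ih (l.filter (fun x => x ≠ a)) (List.nodup_cons.mp hnd).2 hsub'
      rw [hstep]
      simp only [List.length_cons]
      omega

lemma foldA (ns : List String) : ∀ vis dq : List String,
  ∃ d : List String,
    ns.foldl pvStep (vis, dq) = (vis ++ d, dq ++ d) ∧
    (∀ x ∈ d, x ∈ ns ∧ ¬ x ∈ vis) ∧
    (∀ n ∈ ns, n ∈ vis ++ d) ∧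
    (vis.Nodup → (vis ++ d).Nodup) := by
  induction ns with
  | nil => intro vis dq; exact ⟨[], by simp, by simp, by simp, by simp⟩
  | cons nei ns ih =>
      intro vis dq
      by_cases h : nei ∈ vis
      · obtain ⟨d, he, h1, h2, h3⟩ := ih vis dq
        refine ⟨d, ?_, ?_, ?_, h3⟩
        · simp only [List.foldl_cons, pvStep]
          rw [if_pos (by simpa using h)]
          exact he
        · exact fun x hx => ⟨List.mem_cons_of_mem _ (h1 x hx).1, (h1 x hx).2⟩
        · intro n hn
          rcases List.mem_cons.mp hn with rfl | hn
          · exact List.mem_append_left _ h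
          · exact h2 n hn
      · obtain ⟨d, he, h1, h2, h3⟩ := ih (vis ++ [nei]) (dq ++ [nei])
        refine ⟨nei :: d, ?_, ?_, ?_, ?_⟩
        · simp only [List.foldl_cons, pvStep]
          rw [if_neg (by simpa using h)]
          rw [he]; simp
        · intro x hx
          rcases List.mem_cons.mp hx with rfl | hx
          · exact ⟨List.mem_cons_self .., h⟩
          · refine ⟨List.mem_cons_of_mem _ (h1 x hx).1, fun hv => (h1 x hx).2 ?_⟩
            exact List.mem_append_left _ hv
        · intro n hn
          rcases List.mem_cons.mp hn with rfl | hn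
          · simp
          · have := h2 n hn; simpa [List.append_assoc] using this
        · intro hv
          have hnn : (vis ++ [nei]).Nodup := by simpa using List.Nodup.concat h hv
          have h4 := h3 hnn
          simpa [List.append_assoc] using h4

lemma loopA_sound (graph : List (String × List String)) (v : String) :
    ∀ fuel dq visited res, visited = res ++ dq →
    (∀ x ∈ visited, pvReach graph v x) →
    ∀ x ∈ bfsLoopA graph fuel dq visited res, pvReach graph v x := by
  intro fuel
  induction fuel with
  | zero =>
      intro dq visited res hinv hr x hx
      cases dq with
      | nil => exact hr x (by simp [bfsLoopA] at hx; simp [hinv, hx])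
      | cons a t => exact hr x (by simp [bfsLoopA] at hx; simp [hinv, hx])
  | succ fuel ih =>
      intro dq visited res hinv hr x hx
      cases dq with
      | nil => exact hr x (by simp [bfsLoopA] at hx; simp [hinv, hx])
      | cons node dq' =>
          obtain ⟨d, he, h1, h2, h3⟩ := foldA (pvNbrs graph node) visited dq'
          simp only [bfsLoopA, he] at hx
          have hnode : pvReach graph v node := hr node (by simp [hinv])
          refine ih (dq' ++ d) (visited ++ d) (res ++ [node]) ?_ ?_ x hx
          · rw [hinv]; simp
          · intro y hy
            rcases List.mem_append.mp hy with hy | hy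
            · exact hr y hy
            · exact pvReach.step hnode (h1 y hy).1

lemma loopA_main (graph : List (String × List String)) (v : String) :
    ∀ fuel dq visited res, visited = res ++ dq → visited.Nodup →
    (∀ x ∈ res, ∀ y ∈ pvNbrs graph x, y ∈ visited) →
    ((pvU v graph).filter (fun x => ¬ x ∈ visited)).length + dq.length ≤ fuel →
    (∀ x ∈ visited, x ∈ bfsLoopA graph fuel dq visited res) ∧
    (bfsLoopA graph fuel dq visited res).Nodup ∧
    (∀ x ∈ bfsLoopA graph fuel dq visited res, ∀ y ∈ pvNbrs graph x,
       y ∈ bfsLoopA graph fuel dq visited res) := by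
  intro fuel
  induction fuel with
  | zero =>
      intro dq visited res hinv hnd hcl hcount
      cases dq with
      | nil =>
          simp only [bfsLoopA]
          have hv : visited = res := by simpa using hinv
          exact ⟨fun x hx => hv ▸ hx, hv ▸ hnd, fun x hx y hy => hv ▸ hcl x hx y hy⟩
      | cons a t => simp at hcount
  | succ fuel ih =>
      intro dq visited res hinv hnd hcl hcount
      cases dq with
      | nil =>
          simp only [bfsLoopA]
          have hv : visited = res := by simpa using hinv
          exact ⟨fun x hx => hv ▸ hx, hv ▸ hnd, fun x hx y hy => hv ▸ hcl x hx y hy⟩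
      | cons node dq' =>
          obtain ⟨d, he, h1, h2, h3⟩ := foldA (pvNbrs graph node) visited dq'
          simp only [bfsLoopA, he]
          have hdnd : (visited ++ d).Nodup := h3 hnd
          have hdU : ∀ x ∈ d, x ∈ (pvU v graph).filter (fun x => ¬ x ∈ visited) := by
            intro x hx
            refine List.mem_filter.mpr ⟨?_, by simp [(h1 x hx).2]⟩
            exact List.mem_cons_of_mem _ (nbrs_subset graph node x (h1 x hx).1)
          have hdnodup : d.Nodup := (List.nodup_append.mp hdnd).2.1
          have hdrop := filter_drop d ((pvU v graph).filter (fun x => ¬ x ∈ visited)) hdnodup hdU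
          have hmono : ((pvU v graph).filter (fun x => ¬ x ∈ visited ++ d)).length ≤
              (((pvU v graph).filter (fun x => ¬ x ∈ visited)).filter (fun x => ¬ x ∈ d)).length := by
            rw [List.filter_filter]
            apply filter_mono_len
            intro x hx
            simp at hx ⊢
            tauto
          have hcount' : ((pvU v graph).filter (fun x => ¬ x ∈ visited ++ d)).length + (dq' ++ d).length ≤ fuel := by
            simp only [List.length_append] at hcount ⊢
            simp only [List.length_cons] at hcount
            omega
          have hres := ih (dq' ++ d) (visited ++ d) (res ++ [node]) (by rw [hinv]; simp) hdnd ?_ hcount'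
          · obtain ⟨m1, m2, m3⟩ := hres
            refine ⟨fun x hx => m1 x (List.mem_append_left _ hx), m2, m3⟩
          · intro x hx y hy
            rcases List.mem_append.mp hx with hx | hx
            · exact List.mem_append_left _ (hcl x hx y hy)
            · have : x = node := by simpa using hx
              subst this
              exact h2 y hy

lemma foldl_diag {α : Type} (f2 : List String × List String → α → List String × List String)
    (f1 : List String → α → List String)
    (h : ∀ l a, f2 (l, l) a = (f1 l a, f1 l a)) :
    ∀ (ns : List α) (l : List String), ns.foldl f2 (l, l) = (ns.foldl f1 l, ns.foldl f1 l) := by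
  intro ns
  induction ns with
  | nil => intro l; rfl
  | cons a t ih => intro l; simp only [List.foldl_cons, h]; exact ih _

-- the proof-side merged form of B's dfs: visited and res always receive identical appends
def dfsG (graph : List (String × List String)) : Nat → String → List String → List String
  | 0, _, vis => vis
  | Nat.succ fuel, node, vis =>
      (pvNbrs graph node).foldl
        (fun vis nei => if vis.contains nei then vis else dfsG graph fuel nei vis)
        (vis ++ [node])

lemma dfsB_eq_dfsG (graph : List (String × List String)) :
    ∀ fuel node l, dfsB graph fuel node (l, l) = (dfsG graph fuel node l, dfsG graph fuel node l) := by
  intro fuel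
  induction fuel with
  | zero => intro node l; rfl
  | succ fuel ih =>
      intro node l
      simp only [dfsB, dfsG]
      apply foldl_diag
      intro l' a
      by_cases h : a ∈ l'
      · simp [h]
      · simp [h, ih]

lemma foldl_ext (f : List String → String → List String) (hf : ∀ l a, l ⊆ f l a) :
    ∀ (ns : List String) (st : List String), st ⊆ ns.foldl f st := by
  intro ns
  induction ns with
  | nil => intro st; exact fun _ h => h
  | cons a t ih => intro st; exact fun x hx => ih (f st a) (hf st a hx)

lemma dfsG_mono (graph : List (String × List String)) :
    ∀ fuel node vis, vis ⊆ dfsG graph fuel node vis := by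
  intro fuel
  induction fuel with
  | zero => intro node vis; exact fun _ h => h
  | succ fuel ih =>
      intro node vis
      simp only [dfsG]
      intro x hx
      refine foldl_ext _ ?_ _ _ (List.mem_append_left _ hx)
      intro l a
      by_cases h : a ∈ l
      · simp only [List.contains_eq_mem, h, decide_true, if_true]; exact fun _ h => h
      · simp only [List.contains_eq_mem, h, decide_false]; exact ih a l

lemma dfsG_mem_self (graph : List (String × List String)) (fuel : Nat) (node : String)
    (vis : List String) (h : 0 < fuel) : node ∈ dfsG graph fuel node vis := by
  cases fuel with
  | zero => omega
  | succ fuel =>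
      simp only [dfsG]
      refine foldl_ext _ ?_ _ _ (List.mem_append_right _ (List.mem_singleton.mpr rfl))
      intro l a
      by_cases hc : a ∈ l
      · simp only [List.contains_eq_mem, hc, decide_true, if_true]; exact fun _ h => h
      · simp only [List.contains_eq_mem, hc, decide_false]; exact dfsG_mono graph fuel a l

lemma dfsG_sound (graph : List (String × List String)) (v : String) :
    ∀ fuel node vis, pvReach graph v node → (∀ x ∈ vis, pvReach graph v x) →
    ∀ x ∈ dfsG graph fuel node vis, pvReach graph v x := by
  intro fuel
  induction fuel with
  | zero => intro node vis _ hv x hx; exact hv x hx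
  | succ fuel ih =>
      intro node vis hnode hv
      simp only [dfsG]
      have base : ∀ x ∈ vis ++ [node], pvReach graph v x := by
        intro x hx
        rcases List.mem_append.mp hx with hx | hx
        · exact hv x hx
        · exact (List.mem_singleton.mp hx) ▸ hnode
      have aux : ∀ ns : List String, (∀ nei ∈ ns, pvReach graph v nei) →
          ∀ st : List String, (∀ x ∈ st, pvReach graph v x) →
          ∀ x ∈ ns.foldl (fun vis nei => if vis.contains nei then vis else dfsG graph fuel nei vis) st,
            pvReach graph v x := by
        intro ns
        induction ns with
        | nil => intro _ st hst x hx; exact hst x hx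
        | cons a t iht =>
            intro hns st hst
            simp only [List.foldl_cons]
            by_cases hc : a ∈ st
            · rw [if_pos (show st.contains a = true by simpa using hc)]
              exact iht (fun nei hn => hns nei (List.mem_cons_of_mem _ hn)) st hst
            · rw [if_neg (show ¬ st.contains a = true by simpa using hc)]
              refine iht (fun nei hn => hns nei (List.mem_cons_of_mem _ hn)) _ ?_
              exact ih a st (hns a (List.mem_cons_self ..)) hst
      exact aux _ (fun nei hn => pvReach.step hnode hn) _ base

lemma dfsG_nodup (graph : List (String × List String)) :
    ∀ fuel node vis, vis.Nodup → ¬ node ∈ vis → (dfsG graph fuel node vis).Nodup := by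
  intro fuel
  induction fuel with
  | zero => intro node vis h _; exact h
  | succ fuel ih =>
      intro node vis hnd hnm
      simp only [dfsG]
      have aux : ∀ ns : List String, ∀ st : List String, st.Nodup →
          (ns.foldl (fun vis nei => if vis.contains nei then vis else dfsG graph fuel nei vis) st).Nodup := by
        intro ns
        induction ns with
        | nil => intro st h; exact h
        | cons a t iht =>
            intro st hst
            simp only [List.foldl_cons]
            by_cases hc : a ∈ st
            · rw [if_pos (show st.contains a = true by simpa using hc)]
              exact iht st hst
            · rw [if_neg (show ¬ st.contains a = true by simpa using hc)]
              exact iht _ (ih a st hst hc)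
      exact aux _ _ (by simpa using List.Nodup.concat hnm hnd)

lemma dfsG_closure (graph : List (String × List String)) (v : String) :
    ∀ fuel node vis, ¬ node ∈ vis → node ∈ pvU v graph →
    ((pvU v graph).filter (fun x => ¬ x ∈ vis)).length ≤ fuel →
    ∀ x ∈ dfsG graph fuel node vis, ¬ x ∈ vis →
      ∀ y ∈ pvNbrs graph x, y ∈ dfsG graph fuel node vis := by
  intro fuel
  induction fuel with
  | zero =>
      intro node vis hnm hU hcount
      exfalso
      have : node ∈ (pvU v graph).filter (fun x => ¬ x ∈ vis) :=
        List.mem_filter.mpr ⟨hU, by simpa using hnm⟩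
      have := List.length_pos_of_mem this
      omega
  | succ fuel ih =>
      intro node vis hnm hU hcount
      simp only [dfsG]
      have hb : ((pvU v graph).filter (fun x => ¬ x ∈ vis ++ [node])).length ≤ fuel := by
        have hdrop := filter_drop [node] ((pvU v graph).filter (fun x => ¬ x ∈ vis))
          (List.nodup_singleton _)
          (by intro x hx
              simp only [List.mem_singleton] at hx
              subst hx
              exact List.mem_filter.mpr ⟨hU, by simpa using hnm⟩)
        have hmono : ((pvU v graph).filter (fun x => ¬ x ∈ vis ++ [node])).length ≤
            (((pvU v graph).filter (fun x => ¬ x ∈ vis)).filter (fun x => ¬ x ∈ [node])).length := by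
          rw [List.filter_filter]
          apply filter_mono_len
          intro x hx
          simp at hx ⊢
          tauto
        simp only [List.length_singleton] at hdrop
        omega
      have aux : ∀ ns : List String, (∀ n ∈ ns, n ∈ pvU v graph) →
          ∀ st : List String, (vis ++ [node]) ⊆ st →
          ((pvU v graph).filter (fun x => ¬ x ∈ st)).length ≤ fuel →
          (∀ x ∈ st, ¬ x ∈ vis → x = node ∨ ∀ y ∈ pvNbrs graph x, y ∈ st) →
          st ⊆ (ns.foldl (fun vis nei => if vis.contains nei then vis else dfsG graph fuel nei vis) st) ∧
          ((pvU v graph).filter (fun x => ¬ x ∈ (ns.foldl (fun vis nei => if vis.contains nei then vis else dfsG graph fuel nei vis) st))).length ≤ fuel ∧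
          (∀ x ∈ (ns.foldl (fun vis nei => if vis.contains nei then vis else dfsG graph fuel nei vis) st), ¬ x ∈ vis →
              x = node ∨ ∀ y ∈ pvNbrs graph x, y ∈ (ns.foldl (fun vis nei => if vis.contains nei then vis else dfsG graph fuel nei vis) st)) ∧
          (∀ n ∈ ns, n ∈ (ns.foldl (fun vis nei => if vis.contains nei then vis else dfsG graph fuel nei vis) st)) := by
        intro ns
        induction ns with
        | nil =>
            intro _ st hsub hbud hcl
            exact ⟨fun _ h => h, hbud, hcl, by simp⟩
        | cons a t iht =>
            intro hnsU st hsub hbud hcl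
            simp only [List.foldl_cons]
            by_cases hc : a ∈ st
            · have hrw : (if st.contains a = true then st else dfsG graph fuel a st) = st :=
                if_pos (by simpa using hc)
              simp only [hrw]
              obtain ⟨m1, m2, m3, m4⟩ := iht (fun n hn => hnsU n (List.mem_cons_of_mem _ hn)) st hsub hbud hcl
              refine ⟨m1, m2, m3, ?_⟩
              intro n hn
              rcases List.mem_cons.mp hn with rfl | hn
              · exact m1 hc
              · exact m4 n hn
            · have hrw : (if st.contains a = true then st else dfsG graph fuel a st) = dfsG graph fuel a st :=
                if_neg (by simpa using hc)
              simp only [hrw]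
              have haU : a ∈ pvU v graph := hnsU a (List.mem_cons_self ..)
              have hsub' : st ⊆ dfsG graph fuel a st := dfsG_mono graph fuel a st
              have hbud' : ((pvU v graph).filter (fun x => ¬ x ∈ dfsG graph fuel a st)).length ≤ fuel := by
                refine le_trans (filter_mono_len _ _ _ ?_) hbud
                intro x hx
                simp at hx ⊢
                exact fun h => hx (hsub' h)
              have hfuelpos : 0 < fuel := by
                have : a ∈ (pvU v graph).filter (fun x => ¬ x ∈ st) :=
                  List.mem_filter.mpr ⟨haU, by simpa using hc⟩
                have := List.length_pos_of_mem this
                omega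
              have hcl' : ∀ x ∈ dfsG graph fuel a st, ¬ x ∈ vis →
                  x = node ∨ ∀ y ∈ pvNbrs graph x, y ∈ dfsG graph fuel a st := by
                intro x hx hxv
                by_cases hxs : x ∈ st
                · rcases hcl x hxs hxv with h | h
                  · exact Or.inl h
                  · exact Or.inr fun y hy => hsub' (h y hy)
                · exact Or.inr (ih a st hc haU hbud x hx hxs)
              obtain ⟨m1, m2, m3, m4⟩ := iht (fun n hn => hnsU n (List.mem_cons_of_mem _ hn))
                (dfsG graph fuel a st) (fun x hx => hsub' (hsub hx)) hbud' hcl'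
              refine ⟨fun x hx => m1 (hsub' hx), m2, m3, ?_⟩
              intro n hn
              rcases List.mem_cons.mp hn with rfl | hn
              · exact m1 (dfsG_mem_self graph fuel n st hfuelpos)
              · exact m4 n hn
      have hnsU : ∀ n ∈ pvNbrs graph node, n ∈ pvU v graph :=
        fun n hn => List.mem_cons_of_mem _ (nbrs_subset graph node n hn)
      have hclinit : ∀ x ∈ vis ++ [node], ¬ x ∈ vis → x = node ∨ ∀ y ∈ pvNbrs graph x, y ∈ vis ++ [node] := by
        intro x hx hxv
        rcases List.mem_append.mp hx with hx | hx
        · exact absurd hx hxv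
        · exact Or.inl (List.mem_singleton.mp hx)
      obtain ⟨m1, m2, m3, m4⟩ := aux (pvNbrs graph node) hnsU (vis ++ [node]) (fun _ h => h) hb hclinit
      intro x hx hxv
      rcases m3 x hx hxv with h | h
      · subst h
        exact fun y hy => m4 y hy
      · exact h

-- ===== VERDICT (by name: the statement is the Claim_ definition above) =====
theorem bfs_spec : Claim_equal_bfs := by
  intro v graph _ _
  show bfs v graph = bfs_alt v graph
  unfold bfs bfs_alt
  rw [dfsB_eq_dfsG]
  -- A's final res
  have hcountA : ((pvU v graph).filter (fun x => ¬ x ∈ [v])).length + ([v] : List String).length ≤ pvFuel graph := by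
    have h1 : ((pvU v graph).filter (fun x => ¬ x ∈ [v])).length ≤
        (graph.flatMap fun p => p.2).length := by
      show ((v :: graph.flatMap fun p => p.2).filter (fun x => ¬ x ∈ [v])).length ≤ _
      rw [List.filter_cons]
      rw [if_neg (by simp)]
      exact List.length_filter_le _ _
    show _ + (1 : Nat) ≤ 1 + (graph.flatMap (fun p => p.2)).length
    omega
  obtain ⟨a1, a2, a3⟩ := loopA_main graph v (pvFuel graph) [v] [v] [] (by simp) (by simp) (by simp) hcountA
  have hAsound := loopA_sound graph v (pvFuel graph) [v] [v] [] (by simp)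
    (by intro x hx; simp at hx; exact hx ▸ pvReach.refl)
  -- B's final visited/res
  have hBnodup := dfsG_nodup graph (pvFuel graph) v [] (by simp) (by simp)
  have hBsound := dfsG_sound graph v (pvFuel graph) v [] pvReach.refl (by simp)
  have hcountB : ((pvU v graph).filter (fun x => ¬ x ∈ ([] : List String))).length ≤ pvFuel graph := by
    have h1 : ((pvU v graph).filter (fun x => ¬ x ∈ ([] : List String))).length ≤ (pvU v graph).length :=
      List.length_filter_le _ _
    have h2 : (pvU v graph).length = 1 + (graph.flatMap (fun p => p.2)).length := by
      show (v :: graph.flatMap fun p => p.2).length = _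
      simp; omega
    show _ ≤ 1 + (graph.flatMap (fun p => p.2)).length
    omega
  have hBcl := dfsG_closure graph v (pvFuel graph) v [] (by simp) (by simp [pvU]) hcountB
  have hBv : v ∈ dfsG graph (pvFuel graph) v [] :=
    dfsG_mem_self graph (pvFuel graph) v [] (by unfold pvFuel; omega)
  -- reachable ⊆ each result
  have hAr : ∀ x, pvReach graph v x → x ∈ bfsLoopA graph (pvFuel graph) [v] [v] [] := by
    intro x hx
    induction hx with
    | refl => exact a1 v (by simp)
    | step hru hnb ihr => exact a3 _ ihr _ hnb
  have hBr : ∀ x, pvReach graph v x → x ∈ dfsG graph (pvFuel graph) v [] := by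
    intro x hx
    induction hx with
    | refl => exact hBv
    | step hru hnb ihr => exact hBcl _ ihr (by simp) _ hnb
  -- same membership, both nodup → permutation → equal sorted output
  have hperm : (bfsLoopA graph (pvFuel graph) [v] [v] []).Perm (dfsG graph (pvFuel graph) v []) := by
    refine (List.perm_ext_iff_of_nodup a2 hBnodup).mpr ?_
    intro x
    constructor
    · intro hx; exact hBr x (hAsound x hx)
    · intro hx; exact hAr x (hBsound x hx)
  exact (PySem.List.sorted_id_eq_sorted_id_iff_perm _ _).mpr hperm
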